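-- pv_equiv track=rewrite | github.com/eladavid/MARL | simulations/sim_utils.py | get_all_deterministic_policies
-- ===== SOURCE A (Python) =====
-- from typing import List, Dict, Set, Sequence, Any
-- from itertools import product
--
-- def get_all_deterministic_policies(states: Sequence, actions: Sequence):
--     # TODO - write test
--     joint_states = [s for s in states]
--     joint_actions = [a for a in actions]
--     # Generate all permutations of actions for each joint state
--     # Each permutation represents a different possible policy
--     policies = []
--
--     for action_permutation in product(joint_actions, repeat=len(joint_states)):
--         policy = dict(zip(joint_states, action_permutation))
--         policies.append(policy)
--
--     return policies
-- ===== SOURCE B (Python) =====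
-- def get_all_deterministic_policies(states, actions):
--     # Ranking/unranking: each policy is identified with an integer k in
--     # [0, len(actions)**len(states)); the base-|actions| digits of k (most
--     # significant digit = first state) select the action for each state.
--     n = len(states)
--     m = len(actions)
--     policies = []
--     for k in range(m ** n):
--         policy = {}
--         x = k
--         p = m ** n
--         for state in states:
--             p //= m
--             policy[state] = actions[x // p]
--             x %= p
--         policies.append(policy)
--     return policies
-- ===== Notes on version B (the rewrite author's own statement) =====
-- stated objective: alternative
-- what changed: Replaces itertools.product enumeration of action tuples with ranking/unranking: iterate k over range(len(actions)**len(states)) and decode the base-|actions| digits of k (most-significant digit first) to pick each state's action.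
import Mathlib
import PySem

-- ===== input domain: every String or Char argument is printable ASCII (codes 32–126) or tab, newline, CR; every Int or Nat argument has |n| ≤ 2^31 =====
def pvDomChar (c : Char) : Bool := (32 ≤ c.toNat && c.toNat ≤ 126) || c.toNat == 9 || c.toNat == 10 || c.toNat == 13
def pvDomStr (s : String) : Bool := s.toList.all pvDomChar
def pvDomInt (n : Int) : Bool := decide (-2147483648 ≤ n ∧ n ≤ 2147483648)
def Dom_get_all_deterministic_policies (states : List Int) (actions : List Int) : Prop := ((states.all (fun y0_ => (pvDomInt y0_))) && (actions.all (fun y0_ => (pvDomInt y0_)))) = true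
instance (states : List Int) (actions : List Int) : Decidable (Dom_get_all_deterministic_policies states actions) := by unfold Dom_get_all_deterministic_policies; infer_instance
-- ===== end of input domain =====

-- B enumerates policies by ranking/unranking (decoding each k < |A|^|S| in base |A|)
-- instead of itertools.product over action tuples; same values, same order (alternative).


-- ===== PORT A =====
-- itertools.product(xs, repeat=n): first component varies slowest
def pvProdRep (xs : List Int) : Nat → List (List Int)
  | 0 => [[]]
  | n + 1 => xs.flatMap (fun a => (pvProdRep xs n).map (fun t => a :: t))

def get_all_deterministic_policies (states : List Int) (actions : List Int) : List (List (Int × Int)) :=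
  let joint_states := states.map (fun s => s)
  let joint_actions := actions.map (fun a => a)
  -- loop: for each permutation, policy = dict(zip(joint_states, perm)); policies.append(policy)
  (pvProdRep joint_actions joint_states.length).foldl
    (fun policies perm =>
      policies ++ [((joint_states.zip perm).foldl
        (fun d q => d.insert q.1 q.2) (PySem.Dict.empty : PySem.Dict Int Int)).items])
    []

-- ===== PORT B =====
-- for k in range(m ** n): decode k's base-m digits most-significant first; the inner loop
-- state is (policy, x, p). actions[x // p] is always in range when the loop body runs
-- (0 ≤ x // p < m there), so the indexing is ported with pyGetD.
def get_all_deterministic_policies_alt (states : List Int) (actions : List Int) : List (List (Int × Int)) :=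
  let n := states.length
  let m : Int := (actions.length : Int)
  (PySem.List.pyRange 0 (m ^ n) 1).foldl
    (fun policies k =>
      let st := states.foldl
        (fun (st : PySem.Dict Int Int × Int × Int) state =>
          let p := PySem.Int.floordiv st.2.2 m
          (st.1.insert state (PySem.List.pyGetD actions (PySem.Int.floordiv st.2.1 p) 0),
           PySem.Int.mod st.2.1 p, p))
        ((PySem.Dict.empty : PySem.Dict Int Int), k, m ^ n)
      policies ++ [st.1.items])
    []

-- ===== PRECONDITION & SPEC =====
def Spec_get_all_deterministic_policies (states : List Int) (actions : List Int) (out : List (List (Int × Int))) : Prop := out = get_all_deterministic_policies_alt states actions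
instance (states : List Int) (actions : List Int) (out : List (List (Int × Int))) : Decidable (Spec_get_all_deterministic_policies states actions out) := by unfold Spec_get_all_deterministic_policies; infer_instance

-- ===== CLAIM (what is proved, stated in full; the proofs are below) =====
def Claim_equal_get_all_deterministic_policies : Prop := ∀ (states : List Int) (actions : List Int), Dom_get_all_deterministic_policies states actions → Spec_get_all_deterministic_policies states actions (get_all_deterministic_policies states actions)

-- ===== LEMMAS AND PROOFS =====

-- accumulate-append loop is a map
theorem pv_foldl_append_map {α β : Type} (f : α → β) (l : List α) (init : List β) :
    l.foldl (fun acc x => acc ++ [f x]) init = init ++ l.map f := by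
  induction l generalizing init with
  | nil => simp
  | cons x xs ih => simp [List.foldl_cons, ih, List.append_assoc]

-- range (a*b) split into blocks of size b, block index most significant
theorem pv_range_mul (a b : Nat) :
    List.range (a * b) = (List.range a).flatMap (fun i => (List.range b).map (fun j => i * b + j)) := by
  induction a with
  | zero => simp
  | succ a ih =>
      have : (a + 1) * b = a * b + b := by ring
      rw [this, List.range_add, List.range_succ, List.flatMap_append, ← ih]
      simp

-- enumerating a list by index equals flatMap over the list itself
theorem pv_enum_flatMap {β : Type} (l : List Int) (F : Int → List β) :
    (List.range l.length).flatMap (fun i => F (l.getD i 0)) = l.flatMap F := by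
  induction l with
  | nil => simp
  | cons x xs ih =>
      rw [List.length_cons, List.range_succ_eq_map, List.flatMap_cons, List.flatMap_map]
      simp only [List.getD_cons_zero, List.getD_cons_succ]
      rw [List.flatMap_cons, ih]

-- B's digit-decoding inner loop over all k < m^|states| produces exactly the
-- dict(zip states perm) for each perm of product(actions, repeat=|states|), in order.
theorem pv_main (actions : List Int) (states : List Int) (d : PySem.Dict Int Int) :
    (List.range (actions.length ^ states.length)).map
      (fun (k : Nat) => (states.foldl
        (fun (st : PySem.Dict Int Int × Int × Int) state =>
          let p := PySem.Int.floordiv st.2.2 (actions.length : Int)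
          (st.1.insert state (PySem.List.pyGetD actions (PySem.Int.floordiv st.2.1 p) 0),
           PySem.Int.mod st.2.1 p, p))
        (d, (k : Int), ((actions.length : Int)) ^ states.length)).1)
    = (pvProdRep actions states.length).map
        (fun perm => (states.zip perm).foldl (fun d q => d.insert q.1 q.2) d) := by
  induction states generalizing d with
  | nil => simp [pvProdRep]
  | cons s rest ih =>
      by_cases hm : actions.length = 0
      · simp [pvProdRep, List.length_eq_zero_iff.mp hm]
      · have hmpos : 0 < actions.length := Nat.pos_of_ne_zero hm
        have hMpos : (0 : Int) < (actions.length : Int) := by exact_mod_cast hmpos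
        set mN := actions.length with hmN
        set t := mN ^ rest.length with ht
        have hpow : mN ^ (s :: rest).length = mN * t := by
          simp [ht, List.length_cons, pow_succ]; ring
        rw [hpow, pv_range_mul, List.map_flatMap]
        -- first step of the fold on k = i*t + j
        have hstep : ∀ i j : Nat, i < mN → j < t →
            ((s :: rest).foldl
              (fun (st : PySem.Dict Int Int × Int × Int) state =>
                let p := PySem.Int.floordiv st.2.2 (mN : Int)
                (st.1.insert state (PySem.List.pyGetD actions (PySem.Int.floordiv st.2.1 p) 0),
                 PySem.Int.mod st.2.1 p, p))
              (d, ((i * t + j : Nat) : Int), ((mN : Int)) ^ (s :: rest).length)).1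
            = (rest.foldl
              (fun (st : PySem.Dict Int Int × Int × Int) state =>
                let p := PySem.Int.floordiv st.2.2 (mN : Int)
                (st.1.insert state (PySem.List.pyGetD actions (PySem.Int.floordiv st.2.1 p) 0),
                 PySem.Int.mod st.2.1 p, p))
              (d.insert s (actions.getD i 0), ((j : Nat) : Int), ((mN : Int)) ^ rest.length)).1 := by
          intro i j hi hj
          have hT : (0:Int) < ((mN : Int)) ^ rest.length := by positivity
          have hp : PySem.Int.floordiv (((mN : Int)) ^ (s :: rest).length) (mN : Int)
              = ((mN : Int)) ^ rest.length := by
            rw [PySem.Int.floordiv_eq_ediv_of_pos hMpos, List.length_cons, pow_succ,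
              Int.mul_ediv_cancel _ (ne_of_gt hMpos)]
          have hk : ((i * t + j : Nat) : Int)
              = (j : Int) + (i : Int) * ((mN : Int)) ^ rest.length := by
            push_cast [ht]; ring
          have hjlt : (j : Int) < ((mN : Int)) ^ rest.length := by
            rw [ht] at hj; exact_mod_cast hj
          have hdig : PySem.Int.floordiv ((i * t + j : Nat) : Int) (((mN : Int)) ^ rest.length)
              = (i : Int) := by
            rw [PySem.Int.floordiv_eq_ediv_of_pos hT, hk,
              Int.add_mul_ediv_right _ _ (ne_of_gt hT),
              Int.ediv_eq_zero_of_lt (by positivity) hjlt, zero_add]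
          have hrem : PySem.Int.mod ((i * t + j : Nat) : Int) (((mN : Int)) ^ rest.length)
              = (j : Int) := by
            rw [PySem.Int.mod_eq_emod_of_pos hT, hk, Int.add_mul_emod_self_right,
              Int.emod_eq_of_lt (by positivity) hjlt]
          simp only [List.foldl_cons, hp, hdig, hrem, PySem.List.pyGetD_natCast]
        calc (List.range mN).flatMap (fun i => ((List.range t).map (fun j => i * t + j)).map
              (fun (k : Nat) => ((s :: rest).foldl
                (fun (st : PySem.Dict Int Int × Int × Int) state =>
                  let p := PySem.Int.floordiv st.2.2 (mN : Int)
                  (st.1.insert state (PySem.List.pyGetD actions (PySem.Int.floordiv st.2.1 p) 0),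
                   PySem.Int.mod st.2.1 p, p))
                (d, (k : Int), ((mN : Int)) ^ (s :: rest).length)).1))
            = (List.range mN).flatMap (fun i => (pvProdRep actions rest.length).map
                (fun perm => (rest.zip perm).foldl (fun d q => d.insert q.1 q.2)
                  (d.insert s (actions.getD i 0)))) := by
              apply List.flatMap_congr
              intro i himem
              have hi : i < mN := List.mem_range.mp himem
              rw [List.map_map]
              have : ∀ j ∈ List.range t,
                  ((s :: rest).foldl
                    (fun (st : PySem.Dict Int Int × Int × Int) state =>
                      let p := PySem.Int.floordiv st.2.2 (mN : Int)
                      (st.1.insert state (PySem.List.pyGetD actions (PySem.Int.floordiv st.2.1 p) 0),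
                       PySem.Int.mod st.2.1 p, p))
                    (d, ((i * t + j : Nat) : Int), ((mN : Int)) ^ (s :: rest).length)).1
                  = (rest.foldl
                    (fun (st : PySem.Dict Int Int × Int × Int) state =>
                      let p := PySem.Int.floordiv st.2.2 (mN : Int)
                      (st.1.insert state (PySem.List.pyGetD actions (PySem.Int.floordiv st.2.1 p) 0),
                       PySem.Int.mod st.2.1 p, p))
                    (d.insert s (actions.getD i 0), (j : Int), ((mN : Int)) ^ rest.length)).1 := by
                intro j hjmem
                exact hstep i j hi (List.mem_range.mp hjmem)
              exact (List.map_congr_left this).trans (ih (d.insert s (actions.getD i 0)))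
          _ = (pvProdRep actions (s :: rest).length).map
                (fun perm => ((s :: rest).zip perm).foldl (fun d q => d.insert q.1 q.2) d) := by
              rw [show (List.range mN) = List.range actions.length from rfl,
                pv_enum_flatMap actions (fun a => (pvProdRep actions rest.length).map
                  (fun perm => (rest.zip perm).foldl (fun d q => d.insert q.1 q.2) (d.insert s a)))]
              simp only [List.length_cons, pvProdRep, List.map_flatMap]
              apply List.flatMap_congr
              intro a _
              rw [List.map_map]
              rfl

-- ===== VERDICT (by name: the statement is the Claim_ definition above) =====
theorem get_all_deterministic_policies_spec : Claim_equal_get_all_deterministic_policies := by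
  intro states actions _
  unfold Spec_get_all_deterministic_policies get_all_deterministic_policies
    get_all_deterministic_policies_alt
  simp only [List.map_id']
  rw [pv_foldl_append_map, pv_foldl_append_map]
  have hR : PySem.List.pyRange 0 (((actions.length : Int)) ^ states.length) 1
      = (List.range (actions.length ^ states.length)).map (fun (k : Nat) => (k : Int)) := by
    have : (((actions.length : Int)) ^ states.length) = ((actions.length ^ states.length : Nat) : Int) := by
      push_cast; ring
    rw [this, PySem.List.pyRange_zero_natCast]
  rw [hR, List.map_map, List.nil_append, List.nil_append]
  have h := congrArg (List.map (fun d : PySem.Dict Int Int => d.items))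
    (pv_main actions states PySem.Dict.empty)
  rw [List.map_map, List.map_map] at h
  exact h.symm
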